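-- pv_equiv track=rewrite | github.com/EvgeniyPusser/python-intro | codes_testing.py | maxNumberWithOppositeSigns
-- ===== SOURCE A (Python) =====
-- def maxNumberWithOppositeSigns(arr):
--     # Convert array to set for O(1) lookup
--     num_set = set(arr)
--     max_num = None  # Изменяем на None для отслеживания отсутствия результата
--
--
--     for i, num in enumerate(arr):
--         # Check if the opposite sign exists in the array
--         if -num in num_set and num != 0:  # Exclude 0 as it doesn't have a meaningful opposite
--             # Update max_num if this is the first valid number or has larger absolute value
--             # If equal absolute values, prefer the later one (or positive number)
--             if max_num is None or abs(num) > abs(max_num):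
--                 max_num = num
--
--
--     # Возвращаем -1 если не найдено ни одной пары
--     return abs(max_num) if max_num is not None else -1
-- ===== SOURCE B (Python) =====
-- def maxNumberWithOppositeSigns(arr):
--     pos = {x for x in arr if x > 0}
--     neg = {-x for x in arr if x < 0}
--     common = pos & neg
--     return max(common) if common else -1
-- ===== Notes on version B (the rewrite author's own statement) =====
-- stated objective: simpler
-- what changed: Replaces the argmax-tracking loop with an Option sentinel by a set intersection: the answer is max(positives & negated-negatives) with a -1 default, a one-expression formulation.
import Mathlib
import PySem

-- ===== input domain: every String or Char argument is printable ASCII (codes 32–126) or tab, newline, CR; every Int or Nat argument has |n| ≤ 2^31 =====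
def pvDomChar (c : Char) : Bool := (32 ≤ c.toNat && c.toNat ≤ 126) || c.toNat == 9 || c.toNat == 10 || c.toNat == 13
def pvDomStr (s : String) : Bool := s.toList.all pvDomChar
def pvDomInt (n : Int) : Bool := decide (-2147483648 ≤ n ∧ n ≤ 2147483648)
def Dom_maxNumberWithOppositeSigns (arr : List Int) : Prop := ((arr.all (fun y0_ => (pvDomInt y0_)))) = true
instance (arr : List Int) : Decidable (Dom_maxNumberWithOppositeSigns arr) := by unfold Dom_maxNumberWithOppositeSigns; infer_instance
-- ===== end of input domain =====

-- B replaces A's argmax-tracking loop (Option sentinel, abs comparisons) by the max of the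
-- set intersection {x in arr : x > 0} & {-x : x in arr, x < 0}, with -1 as the empty default.

-- ===== PORT A =====
def maxNumberWithOppositeSigns (arr : List Int) : Int :=
  let numSet : PySem.Set Int := PySem.Set.ofList arr
  let maxNum : Option Int := arr.foldl (fun m num =>
    if PySem.Set.contains numSet (-num) && num != 0 then
      match m with
      | none => some num
      | some v => if |num| > |v| then some num else some v
    else m) none
  match maxNum with
  | some v => |v|
  | none => -1

-- ===== PORT B =====
def maxNumberWithOppositeSigns_alt (arr : List Int) : Int :=
  let pos : PySem.Set Int := PySem.Set.ofList (arr.filter (fun x => 0 < x))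
  let neg : PySem.Set Int := PySem.Set.ofList ((arr.filter (fun x => x < 0)).map (fun x => -x))
  let common : PySem.Set Int := PySem.Set.inter pos neg
  match PySem.List.max? common (fun y => y) with
  | some m => m
  | none => -1

-- ===== PRECONDITION & SPEC =====
def Spec_maxNumberWithOppositeSigns (arr : List Int) (out : Int) : Prop := out = maxNumberWithOppositeSigns_alt arr
instance (arr : List Int) (out : Int) : Decidable (Spec_maxNumberWithOppositeSigns arr out) := by unfold Spec_maxNumberWithOppositeSigns; infer_instance

-- ===== CLAIM (what is proved, stated in full; the proofs are below) =====
def Claim_equal_maxNumberWithOppositeSigns : Prop := ∀ (arr : List Int), Dom_maxNumberWithOppositeSigns arr → Spec_maxNumberWithOppositeSigns arr (maxNumberWithOppositeSigns arr)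

-- ===== LEMMAS AND PROOFS =====

-- abs-or-sentinel view of A's accumulator
def pvAbsOr : Option Int → Int
  | none => -1
  | some v => |v|

-- A's loop, seen through pvAbsOr, is a running max of |num| over the valid elements.
theorem pvA_fold (arr xs : List Int) (m : Option Int) :
    pvAbsOr (xs.foldl (fun m num =>
      if PySem.Set.contains (PySem.Set.ofList arr) (-num) && num != 0 then
        match m with
        | none => some num
        | some v => if |num| > |v| then some num else some v
      else m) m)
    = xs.foldl (fun acc num =>
        if (-num) ∈ arr ∧ num ≠ 0 then max acc |num| else acc) (pvAbsOr m) := by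
  induction xs generalizing m with
  | nil => rfl
  | cons x t ih =>
    simp only [List.foldl_cons]
    rw [ih]
    congr 1
    by_cases h : (-x) ∈ arr ∧ x ≠ 0
    · have hb : (PySem.Set.contains (PySem.Set.ofList arr) (-x) && x != 0) = true := by
        rw [Bool.and_eq_true]
        exact ⟨by rw [PySem.Set.contains_iff, PySem.Set.mem_ofList]; exact h.1, by simpa using h.2⟩
      simp only [hb, if_pos h, if_true]
      cases m with
      | none =>
        show pvAbsOr (some x) = max (pvAbsOr none) |x|
        have h0 : (0 : Int) ≤ |x| := abs_nonneg x
        simp only [pvAbsOr]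
        omega
      | some v =>
        show pvAbsOr (if |x| > |v| then some x else some v) = max (pvAbsOr (some v)) |x|
        by_cases hlt : |x| > |v|
        · rw [if_pos hlt]; simp only [pvAbsOr]; omega
        · rw [if_neg hlt]; simp only [pvAbsOr]; omega
    · have hb : (PySem.Set.contains (PySem.Set.ofList arr) (-x) && x != 0) = false := by
        rw [Bool.and_eq_false_iff]
        by_cases hmem : (-x) ∈ arr
        · right; simp only [bne_eq_false_iff_eq]; by_contra hne
          exact h ⟨hmem, by simpa using hne⟩
        · left; simp [PySem.Set.mem_ofList, hmem]
      simp [h]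

-- the running-max-with-condition fold is the max fold of the filtered, mapped list
theorem pvFold_filter_map (p : Int → Prop) [DecidablePred p] (f : Int → Int) (xs : List Int) (a : Int) :
    xs.foldl (fun acc num => if p num then max acc (f num) else acc) a
    = ((xs.filter (fun x => decide (p x))).map f).foldl max a := by
  induction xs generalizing a with
  | nil => rfl
  | cons x t ih =>
    by_cases h : p x <;> simp [h, ih]

-- foldl max (-1) depends only on membership
theorem pvFoldMax_le (l : List Int) (a : Int) (x : Int) (hx : x ∈ l) : x ≤ l.foldl max a :=
  (PySem.List.le_foldl_max l a).2 x hx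

theorem pvFoldMax_ext (l₁ l₂ : List Int) (a : Int) (h : ∀ x, x ∈ l₁ ↔ x ∈ l₂) :
    l₁.foldl max a = l₂.foldl max a := by
  apply le_antisymm
  · rcases PySem.List.foldl_max_mem l₁ a with h1 | h1
    · rw [h1]; exact (PySem.List.le_foldl_max l₂ a).1
    · exact pvFoldMax_le _ _ _ ((h _).1 h1)
  · rcases PySem.List.foldl_max_mem l₂ a with h2 | h2
    · rw [h2]; exact (PySem.List.le_foldl_max l₁ a).1
    · exact pvFoldMax_le _ _ _ ((h _).2 h2)

-- membership in B's intersection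
theorem pvMem_common (arr : List Int) (x : Int) :
    x ∈ PySem.Set.inter (PySem.Set.ofList (arr.filter (fun x => 0 < x)))
          (PySem.Set.ofList ((arr.filter (fun x => x < 0)).map (fun x => -x)))
    ↔ (x ∈ arr ∧ (-x) ∈ arr ∧ 0 < x) := by
  rw [PySem.Set.mem_inter, PySem.Set.mem_ofList, PySem.Set.mem_ofList]
  simp only [List.mem_filter, List.mem_map, decide_eq_true_eq]
  constructor
  · rintro ⟨⟨hx, hpos⟩, z, ⟨hz, hzneg⟩, rfl⟩
    exact ⟨hx, by simpa using hz, hpos⟩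
  · rintro ⟨hx, hnx, hpos⟩
    exact ⟨⟨hx, hpos⟩, -x, ⟨hnx, by omega⟩, by omega⟩

-- membership in A's valid-abs list
theorem pvMem_validAbs (arr : List Int) (x : Int) :
    x ∈ (arr.filter (fun y => decide ((-y) ∈ arr ∧ y ≠ 0))).map (fun y => |y|)
    ↔ (x ∈ arr ∧ (-x) ∈ arr ∧ 0 < x) := by
  simp only [List.mem_map, List.mem_filter, decide_eq_true_eq]
  constructor
  · rintro ⟨y, ⟨hy, hny, hy0⟩, rfl⟩
    rcases lt_or_gt_of_ne hy0 with hneg | hpos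
    · rw [abs_of_neg hneg]
      exact ⟨hny, by simpa using hy, by omega⟩
    · rw [abs_of_pos hpos]
      exact ⟨hy, hny, hpos⟩
  · rintro ⟨hx, hnx, hpos⟩
    exact ⟨x, ⟨hx, hnx, by omega⟩, abs_of_pos hpos⟩

-- B's result is the max fold of its intersection list, from -1
theorem pvMaxD (l : List Int) (hpos : ∀ c ∈ l, 0 < c) :
    (match PySem.List.max? l (fun y => y) with | some m => m | none => -1) = l.foldl max (-1) := by
  cases l with
  | nil => simp [PySem.List.max?]
  | cons c t =>
    rw [PySem.List.max?_id_cons]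
    simp only [List.foldl_cons]
    have hmx : max (-1 : Int) c = c := by have := hpos c List.mem_cons_self; omega
    rw [hmx]

-- B's result is the max fold of its intersection list, from -1
theorem pvB_eq_foldMax (arr : List Int) :
    maxNumberWithOppositeSigns_alt arr
    = (PySem.Set.inter (PySem.Set.ofList (arr.filter (fun x => 0 < x)))
        (PySem.Set.ofList ((arr.filter (fun x => x < 0)).map (fun x => -x)))).foldl max (-1) := by
  exact pvMaxD _ (fun c hc => ((pvMem_common arr c).1 hc).2.2)

-- ===== VERDICT (by name: the statement is the Claim_ definition above) =====
theorem maxNumberWithOppositeSigns_spec : Claim_equal_maxNumberWithOppositeSigns := by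
  intro arr _
  unfold Spec_maxNumberWithOppositeSigns
  have hA : maxNumberWithOppositeSigns arr
      = ((arr.filter (fun y => decide ((-y) ∈ arr ∧ y ≠ 0))).map (fun y => |y|)).foldl max (-1) := by
    unfold maxNumberWithOppositeSigns
    rw [show (match arr.foldl (fun m num =>
        if PySem.Set.contains (PySem.Set.ofList arr) (-num) && num != 0 then
          match m with
          | none => some num
          | some v => if |num| > |v| then some num else some v
        else m) none with
      | some v => |v|
      | none => -1) = pvAbsOr (arr.foldl (fun m num =>
        if PySem.Set.contains (PySem.Set.ofList arr) (-num) && num != 0 then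
          match m with
          | none => some num
          | some v => if |num| > |v| then some num else some v
        else m) none) from by cases h : arr.foldl _ none <;> simp [pvAbsOr]]
    rw [pvA_fold arr arr none]
    simp only [pvAbsOr]
    exact pvFold_filter_map (fun num => (-num) ∈ arr ∧ num ≠ 0) (fun y => |y|) arr (-1)
  rw [hA, pvB_eq_foldMax]
  exact pvFoldMax_ext _ _ _ (fun x => (pvMem_validAbs arr x).trans (pvMem_common arr x).symm)
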